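-- pv_equiv track=rewrite | github.com/lauraahwa/iw | rules_based_engine.py | check_singular_plural_confusion
-- ===== SOURCE A (Python) =====
-- word_to_num = {
--     "one": 1,
--     "two": 2,
--     "three": 3,
--     "four": 4,
--     "five": 5,
--     "six": 6,
--     "seven": 7,
--     "eight": 8,
--     "nine": 9,
--     "ten": 10,
--     "hundred": 100,
--     "hundreds": 100,
--     "thousand": 1000,
--     "thousands": 1000,
--     "million": 10e6,
--     "millions": 10e6
-- }
--
-- def word_to_number(word):
--     """
--     Converts a word or digit string into an integer.
--
--     Parameters:
--         word (str): The input word or string.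
--
--     Returns:
--         int: The corresponding integer value, or None if not valid.
--     """
--     if word.isdigit():  # Check if it's a numeric string
--         return int(word)
--     elif word.lower() in word_to_num:  # Check if it's a number word
--         return word_to_num[word.lower()]
--     return None
--
-- def check_singular_plural_confusion(tagged_tokens):
--     """
--     Checks for singular/plural noun confusion errors based on POS tags and context.
--     Uses Penn Treebank POS tags to detect errors in singular/plural noun usage.
--
--     Parameters:
--         tagged_tokens (list of tuples): List of (word, POS) tuples.
--
--     Returns:
--         int: Number of singular/plural noun confusion errors detected.
--     """
--     errors = 0
--     for i, (word, pos) in enumerate(tagged_tokens):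
--         number = word_to_number(word)
--         if pos in {"DT", "CD"} and word.lower() in {"a", "an", "one", "this", "that"} or (number == 1):
--             for j in range(i + 1, len(tagged_tokens)):
--                 if tagged_tokens[j][1] in {"NN", "NNS"}:
--                     if tagged_tokens[j][1] == "NNS":
--                         errors += 1
--                     break
--
--         elif pos in {"DT", "CD", "JJ", "PDT"} and word.lower() in {"many", "several", "these", "those", "all", "both"} or (number and number > 1):
--             for j in range(i + 1, len(tagged_tokens)):
--                 if tagged_tokens[j][1] in {"NN", "NNS"}:
--                     if tagged_tokens[j][1] == "NN":
--                         errors += 1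
--                     break
--
--     return errors
-- ===== SOURCE B (Python) =====
-- word_to_num = {
--     "one": 1, "two": 2, "three": 3, "four": 4, "five": 5, "six": 6,
--     "seven": 7, "eight": 8, "nine": 9, "ten": 10,
--     "hundred": 100, "hundreds": 100, "thousand": 1000, "thousands": 1000,
--     "million": 10e6, "millions": 10e6,
-- }
--
-- def _number_of(word):
--     if word.isdigit():
--         return int(word)
--     return word_to_num.get(word.lower())
--
-- def check_singular_plural_confusion(tagged_tokens):
--     n = len(tagged_tokens)
--     # one backward pass: next_noun[i] = POS tag of the first NN/NNS strictly after i
--     next_noun = [None] * n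
--     seen = None
--     for i in range(n - 1, -1, -1):
--         next_noun[i] = seen
--         if tagged_tokens[i][1] in ("NN", "NNS"):
--             seen = tagged_tokens[i][1]
--     errors = 0
--     for i in range(n):
--         word, pos = tagged_tokens[i]
--         w = word.lower()
--         num = _number_of(word)
--         if (pos in ("DT", "CD") and w in ("a", "an", "one", "this", "that")) or num == 1:
--             if next_noun[i] == "NNS":
--                 errors += 1
--         elif (pos in ("DT", "CD", "JJ", "PDT") and w in ("many", "several", "these", "those", "all", "both")) or (num is not None and num > 1):
--             if next_noun[i] == "NN":
--                 errors += 1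
--     return errors
-- ===== Notes on version B (the rewrite author's own statement) =====
-- stated objective: alternative
-- what changed: Replaced A's forward rescan for the next noun at every trigger token with a single backward pass that precomputes the next-noun tag for every position, then one lookup per token.
import Mathlib
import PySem

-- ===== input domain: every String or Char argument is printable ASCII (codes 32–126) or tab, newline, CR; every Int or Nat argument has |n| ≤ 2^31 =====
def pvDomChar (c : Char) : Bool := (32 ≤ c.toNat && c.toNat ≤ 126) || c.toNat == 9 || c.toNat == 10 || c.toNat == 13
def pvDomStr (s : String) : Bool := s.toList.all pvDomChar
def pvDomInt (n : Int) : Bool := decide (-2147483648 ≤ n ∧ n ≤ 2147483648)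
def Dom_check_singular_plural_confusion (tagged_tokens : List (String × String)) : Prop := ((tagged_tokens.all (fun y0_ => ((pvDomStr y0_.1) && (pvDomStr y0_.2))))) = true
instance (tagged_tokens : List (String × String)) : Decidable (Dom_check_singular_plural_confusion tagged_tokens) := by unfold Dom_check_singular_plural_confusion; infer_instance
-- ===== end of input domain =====

-- B replaces A's per-trigger forward rescan for the next noun with one backward pass that
-- precomputes the next-noun tag for every position, then one lookup per token.

-- Shared constants/conditions (identical in Source A and Source B).
-- Python's float values 10e6 are represented as the integer 10000000: exact for the
-- == 1 and > 1 comparisons the programs make.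
def wordToNumDict : PySem.Dict String Int :=
  PySem.Dict.ofList [("one", 1), ("two", 2), ("three", 3), ("four", 4), ("five", 5),
    ("six", 6), ("seven", 7), ("eight", 8), ("nine", 9), ("ten", 10),
    ("hundred", 100), ("hundreds", 100), ("thousand", 1000), ("thousands", 1000),
    ("million", 10000000), ("millions", 10000000)]

-- the two trigger conditions, textually identical in A and B (w = word.lower())
def singTrig (w pos : String) (num : Option Int) : Bool :=
  ((pos == "DT" || pos == "CD") &&
    (w == "a" || w == "an" || w == "one" || w == "this" || w == "that")) || num == some 1

def plurTrig (w pos : String) (num : Option Int) : Bool :=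
  ((pos == "DT" || pos == "CD" || pos == "JJ" || pos == "PDT") &&
    (w == "many" || w == "several" || w == "these" || w == "those" || w == "all" || w == "both")) ||
  (match num with | some n => decide (n > 1) | none => false)   -- Python 'number and number > 1'

-- ===== PORT A =====
-- Source A's word_to_number (dict membership test, then lookup)
def word_to_number (word : String) : Option Int :=
  if PySem.Str.strIsdigit word then PySem.Int.ofStr? word
  else if wordToNumDict.contains (PySem.Str.lower word) then
    wordToNumDict.get? (PySem.Str.lower word)
  else none

-- A's inner loop 'for j in range(i+1, …)' for a singular trigger, run on the suffix after i
def innerSing : List (String × String) → Int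
  | [] => 0
  | (_, t) :: rest =>
    if t == "NN" || t == "NNS" then (if t == "NNS" then 1 else 0) else innerSing rest

-- A's inner loop for a plural trigger
def innerPlur : List (String × String) → Int
  | [] => 0
  | (_, t) :: rest =>
    if t == "NN" || t == "NNS" then (if t == "NN" then 1 else 0) else innerPlur rest

def check_singular_plural_confusion : List (String × String) → Int
  | [] => 0
  | (word, pos) :: rest =>
    let w := PySem.Str.lower word
    let number := word_to_number word
    (if singTrig w pos number then innerSing rest
     else if plurTrig w pos number then innerPlur rest
     else 0) + check_singular_plural_confusion rest

-- ===== PORT B =====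
-- Source B's _number_of (dict .get)
def numberOf (word : String) : Option Int :=
  if PySem.Str.strIsdigit word then PySem.Int.ofStr? word
  else wordToNumDict.get? (PySem.Str.lower word)

-- Source B's backward pass: returns (next_noun list, tag of the first NN/NNS of the whole list)
def nextNounTags : List (String × String) → List (Option String) × Option String
  | [] => ([], none)
  | (_, t) :: rest =>
    let (l, seen) := nextNounTags rest
    (seen :: l, if t == "NN" || t == "NNS" then some t else seen)

-- Source B's forward pass over (token, next_noun[i]) pairs
def altStep (errors : Int) (p : (String × String) × Option String) : Int :=
  if singTrig (PySem.Str.lower p.1.1) p.1.2 (numberOf p.1.1) then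
    (if p.2 == some "NNS" then errors + 1 else errors)
  else if plurTrig (PySem.Str.lower p.1.1) p.1.2 (numberOf p.1.1) then
    (if p.2 == some "NN" then errors + 1 else errors)
  else errors

def check_singular_plural_confusion_alt (tagged_tokens : List (String × String)) : Int :=
  (tagged_tokens.zip (nextNounTags tagged_tokens).1).foldl altStep 0

-- ===== PRECONDITION & SPEC =====
def Spec_check_singular_plural_confusion (tagged_tokens : List (String × String)) (out : Int) : Prop := out = check_singular_plural_confusion_alt tagged_tokens
instance (tagged_tokens : List (String × String)) (out : Int) : Decidable (Spec_check_singular_plural_confusion tagged_tokens out) := by unfold Spec_check_singular_plural_confusion; infer_instance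

-- ===== CLAIM (what is proved, stated in full; the proofs are below) =====
def Claim_equal_check_singular_plural_confusion : Prop := ∀ (tagged_tokens : List (String × String)), Dom_check_singular_plural_confusion tagged_tokens → Spec_check_singular_plural_confusion tagged_tokens (check_singular_plural_confusion tagged_tokens)

-- ===== LEMMAS AND PROOFS =====

theorem word_to_number_eq_numberOf (word : String) : word_to_number word = numberOf word := by
  unfold word_to_number numberOf
  split_ifs with h hc
  · rfl
  · rfl
  · exact ((PySem.Dict.get?_eq_none_iff_contains _ _).mpr (by simpa using hc)).symm

theorem innerSing_eq (rest : List (String × String)) :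
    innerSing rest = (if (nextNounTags rest).2 == some "NNS" then 1 else 0) := by
  induction rest with
  | nil => simp [innerSing, nextNounTags]
  | cons x r ih =>
    obtain ⟨_, t⟩ := x
    simp only [innerSing, nextNounTags]
    by_cases h : t == "NN" || t == "NNS" <;> simp [h, ih]

theorem innerPlur_eq (rest : List (String × String)) :
    innerPlur rest = (if (nextNounTags rest).2 == some "NN" then 1 else 0) := by
  induction rest with
  | nil => simp [innerPlur, nextNounTags]
  | cons x r ih =>
    obtain ⟨_, t⟩ := x
    simp only [innerPlur, nextNounTags]
    by_cases h : t == "NN" || t == "NNS" <;> simp [h, ih]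

theorem altStep_acc (e : Int) (p : (String × String) × Option String) :
    altStep e p = e + altStep 0 p := by
  unfold altStep
  split_ifs <;> omega

theorem foldl_altStep_acc (l : List ((String × String) × Option String)) (e : Int) :
    l.foldl altStep e = e + l.foldl altStep 0 := by
  induction l generalizing e with
  | nil => simp
  | cons x xs ih =>
    simp only [List.foldl_cons]
    rw [ih (altStep e x), ih (altStep 0 x), altStep_acc e x]
    omega

theorem ports_agree (ts : List (String × String)) :
    check_singular_plural_confusion ts = check_singular_plural_confusion_alt ts := by
  induction ts with
  | nil => rfl
  | cons x rest ih =>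
    obtain ⟨word, pos⟩ := x
    show (if singTrig (PySem.Str.lower word) pos (word_to_number word) then innerSing rest
          else if plurTrig (PySem.Str.lower word) pos (word_to_number word) then innerPlur rest
          else 0) + check_singular_plural_confusion rest
        = check_singular_plural_confusion_alt ((word, pos) :: rest)
    have hB : check_singular_plural_confusion_alt ((word, pos) :: rest)
        = altStep 0 ((word, pos), (nextNounTags rest).2) + check_singular_plural_confusion_alt rest := by
      unfold check_singular_plural_confusion_alt
      simp only [nextNounTags, List.zip_cons_cons, List.foldl_cons]
      rw [foldl_altStep_acc]
    rw [hB, ← ih, word_to_number_eq_numberOf]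
    unfold altStep
    simp only
    split_ifs <;> simp [innerSing_eq, innerPlur_eq, *]

-- ===== VERDICT (by name: the statement is the Claim_ definition above) =====
theorem check_singular_plural_confusion_spec : Claim_equal_check_singular_plural_confusion := by
  intro ts _
  exact ports_agree ts
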